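-- pv_equiv track=rewrite | github.com/cjswo4034/Algorithm_python | coding_tests/prgms_monthly_challenge/september/3.py | solution
-- ===== SOURCE A (Python) =====
-- def solution(a):
--     answer, length = 0, len(a)
--     min_v = 1000000001
--     left = [0 for _ in range(length)]
--     # 1. 왼쪽에서 작은 수 찾기
--     for i in range(length):
--         left[i] = min_v
--         if min_v > a[i]: min_v = a[i]
--
--     min_v = 1000000001
--     # 2. 오른쪽에서 작은 수 찾으면서 값 비교하기
--     for i in range(length - 1, -1, -1):
--         if a[i] < min_v or a[i] < left[i]: answer += 1
--         if min_v > a[i]: min_v = a[i]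
--
--     return answer
-- ===== SOURCE B (Python) =====
-- def solution(a):
--     # Direct definition: an element counts iff it is smaller than every element
--     # on at least one side; 1000000001 stands in for the empty side, as in A.
--     SENT = 1000000001
--     return sum(1 for i, x in enumerate(a)
--                if x < min([SENT] + a[:i]) or x < min([SENT] + a[i + 1:]))
-- ===== Notes on version B (the rewrite author's own statement) =====
-- stated objective: simpler
-- what changed: Replaces A's two stateful index loops (building a prefix-min array, then a backward pass coupling the count with a running suffix minimum) by a single comprehension that counts indices whose element is below the minimum of either side, taken directly over slices with the sentinel 1000000001 as the empty-side value.
import Mathlib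
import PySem

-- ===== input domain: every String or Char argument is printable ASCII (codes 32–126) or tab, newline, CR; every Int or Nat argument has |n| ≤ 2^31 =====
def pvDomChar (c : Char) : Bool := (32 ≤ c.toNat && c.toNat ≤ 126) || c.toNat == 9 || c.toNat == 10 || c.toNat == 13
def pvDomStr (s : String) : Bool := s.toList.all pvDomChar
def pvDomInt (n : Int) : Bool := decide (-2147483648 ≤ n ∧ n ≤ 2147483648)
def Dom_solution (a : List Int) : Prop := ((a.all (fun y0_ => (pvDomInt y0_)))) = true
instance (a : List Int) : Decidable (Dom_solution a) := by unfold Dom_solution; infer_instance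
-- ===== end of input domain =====

-- B replaces A's two stateful index loops (a prefix-min array, then a backward
-- pass coupling the count with a running suffix min) by the direct definition:
-- one comprehension counting the i with a[i] < min of one side (sentinel
-- 1000000001 for the empty side, as in A).  Objective: simpler (B is O(n^2)
-- where A is O(n); no speed is claimed).

-- ===== PORT A =====
def solution (a : List Int) : Int :=
  let answer : Int := 0
  let length : Nat := a.length
  let minv : Int := 1000000001
  let left : List Int := (PySem.List.pyRange 0 (length : Int) 1).map (fun _ => (0 : Int))
  -- 1. find smaller values from the left
  let st1 : List Int × Int :=
    (PySem.List.pyRange 0 (length : Int) 1).foldl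
      (fun (st : List Int × Int) i =>
        let l := PySem.List.pySetD st.1 i st.2
        let m := if st.2 > PySem.List.pyGetD a i 0 then PySem.List.pyGetD a i 0 else st.2
        (l, m))
      (left, minv)
  let left := st1.1
  let minv : Int := 1000000001
  -- 2. find smaller values from the right while comparing
  let st2 : Int × Int :=
    (PySem.List.pyRange ((length : Int) - 1) (-1) (-1)).foldl
      (fun (st : Int × Int) i =>
        let ans := if PySem.List.pyGetD a i 0 < st.2 || PySem.List.pyGetD a i 0 < PySem.List.pyGetD left i 0
                   then st.1 + 1 else st.1
        let m := if st.2 > PySem.List.pyGetD a i 0 then PySem.List.pyGetD a i 0 else st.2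
        (ans, m))
      (answer, minv)
  st2.1

-- ===== PORT B =====
-- min([SENT] + side) is min over a list that is a literal cons, hence nonempty:
-- the minD default 0 is unreachable.
def solution_alt (a : List Int) : Int :=
  ((PySem.List.enumerate a 0).map (fun p =>
    if p.2 < PySem.List.minD ((1000000001 : Int) :: PySem.List.slice a none (some p.1)) (fun y => y) 0 ||
       p.2 < PySem.List.minD ((1000000001 : Int) :: PySem.List.slice a (some (p.1 + 1)) none) (fun y => y) 0
    then (1 : Int) else 0)).sum

-- ===== PRECONDITION & SPEC =====
def Spec_solution (a : List Int) (out : Int) : Prop := out = solution_alt a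
instance (a : List Int) (out : Int) : Decidable (Spec_solution a out) := by unfold Spec_solution; infer_instance

-- ===== CLAIM (what is proved, stated in full; the proofs are below) =====
def Claim_equal_solution : Prop := ∀ (a : List Int), Dom_solution a → Spec_solution a (solution a)

-- ===== LEMMAS AND PROOFS =====

-- prefix minimum of a[0..i-1] with the sentinel, and suffix minimum of a[k..]
def pvPm (a : List Int) (i : Nat) : Int := (a.take i).foldl min 1000000001
def pvSm (a : List Int) (k : Nat) : Int := (a.drop k).foldl min 1000000001

theorem pvFoldlMinSwap (t : List Int) (s x : Int) :
    t.foldl min (min s x) = min (t.foldl min s) x := by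
  induction t generalizing s with
  | nil => rfl
  | cons y t ih =>
    simp only [List.foldl_cons]
    rw [min_right_comm, ih]

theorem pvIteMin (m x : Int) : (if m > x then x else m) = min m x := by
  rw [min_def]; split_ifs <;> omega

theorem pvPmSucc (a : List Int) (k : Nat) (hk : k < a.length) :
    pvPm a (k + 1) = min (pvPm a k) a[k] := by
  unfold pvPm
  have h : a.take (k + 1) = a.take k ++ [a[k]] := by
    rw [List.take_add_one, List.getElem?_eq_getElem hk]
    rfl
  rw [h, List.foldl_append]
  rfl

theorem pvSmSucc (a : List Int) (k : Nat) (hk : k < a.length) :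
    pvSm a k = min (pvSm a (k + 1)) a[k] := by
  unfold pvSm
  rw [List.drop_eq_getElem_cons hk]
  simp only [List.foldl_cons]
  rw [pvFoldlMinSwap]

-- loop 1 invariant: after handling range(k), left holds pvPm below k and min_v = pvPm k
theorem pvLoop1 (a : List Int) (k : Nat) (hk : k ≤ a.length) :
    (PySem.List.pyRange 0 (k : Int) 1).foldl
      (fun (st : List Int × Int) i =>
        let l := PySem.List.pySetD st.1 i st.2
        let m := if st.2 > PySem.List.pyGetD a i 0 then PySem.List.pyGetD a i 0 else st.2
        (l, m))
      ((List.range a.length).map (fun i => if i < 0 then pvPm a i else 0), 1000000001)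
    = ((List.range a.length).map (fun i => if i < k then pvPm a i else 0), pvPm a k) := by
  induction k with
  | zero =>
    rw [show ((0 : Nat) : Int) = 0 from rfl, PySem.List.pyRange_one_eq_nil le_rfl]
    rfl
  | succ k ih =>
    have hk' : k ≤ a.length := Nat.le_of_succ_le hk
    have hkl : k < a.length := hk
    have hcast : ((k + 1 : Nat) : Int) = (k : Int) + 1 := by push_cast; ring
    rw [hcast, PySem.List.pyRange_one_succ_right (Int.natCast_nonneg k), List.foldl_append, ih hk']
    simp only [List.foldl_cons, List.foldl_nil]
    refine Prod.ext ?_ ?_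
    · show PySem.List.pySetD ((List.range a.length).map (fun i => if i < k then pvPm a i else 0)) (k : Int) (pvPm a k) = _
      unfold PySem.List.pySetD
      rw [PySem.List.pySet?_natCast _ _ _ (by simpa using hkl)]
      simp only [Option.getD_some]
      apply List.ext_getElem (by simp)
      intro j hj1 hj2
      simp only [List.getElem_set, List.getElem_map, List.getElem_range]
      split_ifs <;> subst_vars <;> first | rfl | omega
    · show (if pvPm a k > PySem.List.pyGetD a (k : Int) 0 then PySem.List.pyGetD a (k : Int) 0 else pvPm a k) = pvPm a (k + 1)
      rw [PySem.List.pyGetD_natCast, List.getD_eq_getElem _ _ hkl, pvIteMin, pvPmSucc a k hkl]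

-- loop 2 invariant: the backward pass over range(k-1, -1, -1) entered with
-- min_v = pvSm k adds one count for each i < k satisfying the condition
theorem pvLoop2 (a left : List Int) (hleft : left = (List.range a.length).map (fun i => if i < a.length then pvPm a i else 0))
    (k : Nat) (hk : k ≤ a.length) (ans : Int) :
    ((PySem.List.pyRange ((k : Int) - 1) (-1) (-1)).foldl
      (fun (st : Int × Int) i =>
        let ansv := if PySem.List.pyGetD a i 0 < st.2 || PySem.List.pyGetD a i 0 < PySem.List.pyGetD left i 0
                    then st.1 + 1 else st.1
        let m := if st.2 > PySem.List.pyGetD a i 0 then PySem.List.pyGetD a i 0 else st.2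
        (ansv, m))
      (ans, pvSm a k)).1
    = ans + ((List.range k).map (fun i =>
        if decide (a.getD i 0 < pvSm a (i + 1)) || decide (a.getD i 0 < pvPm a i) then (1 : Int) else 0)).sum := by
  induction k generalizing ans with
  | zero =>
    rw [PySem.List.pyRange_neg_one_eq_nil (by norm_num)]
    simp
  | succ k ih =>
    have hkl : k < a.length := hk
    have h1 : ((k + 1 : Nat) : Int) - 1 = (k : Int) := by push_cast; ring
    rw [h1, PySem.List.pyRange_neg_one_cons (by omega)]
    simp only [List.foldl_cons]
    have hget : PySem.List.pyGetD a (k : Int) 0 = a.getD k 0 := PySem.List.pyGetD_natCast a k 0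
    have hgetl : PySem.List.pyGetD left (k : Int) 0 = pvPm a k := by
      rw [PySem.List.pyGetD_natCast, hleft, List.getD_eq_getElem _ _ (by simpa using hkl)]
      simp [hkl]
    have hmin : (if pvSm a (k + 1) > PySem.List.pyGetD a (k : Int) 0 then PySem.List.pyGetD a (k : Int) 0 else pvSm a (k + 1))
        = pvSm a k := by
      rw [pvIteMin, hget, List.getD_eq_getElem _ _ hkl, ← pvSmSucc a k hkl]
    rw [hmin, ih (Nat.le_of_succ_le hk)]
    rw [List.range_succ]
    simp only [List.map_append, List.sum_append, List.map_cons, List.map_nil, List.sum_cons, List.sum_nil]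
    rw [hget, hgetl]
    split_ifs <;> ring

-- A computes the count of the direct condition
theorem pvSolutionEq (a : List Int) :
    solution a = ((List.range a.length).map (fun i =>
      if decide (a.getD i 0 < pvSm a (i + 1)) || decide (a.getD i 0 < pvPm a i) then (1 : Int) else 0)).sum := by
  unfold solution
  simp only []
  have hinit : (PySem.List.pyRange 0 (a.length : Int) 1).map (fun _ => (0 : Int))
      = (List.range a.length).map (fun i => if i < 0 then pvPm a i else 0) := by
    rw [PySem.List.pyRange_zero_nat, List.map_map]
    apply List.map_congr_left
    intro i _
    simp
  rw [hinit, pvLoop1 a a.length le_rfl]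
  have hsm : (1000000001 : Int) = pvSm a a.length := by
    unfold pvSm; simp
  rw [hsm]
  have := pvLoop2 a ((List.range a.length).map (fun i => if i < a.length then pvPm a i else 0)) rfl
    a.length le_rfl 0
  rw [this]
  ring

-- B computes the same count
theorem pvSolutionAltEq (a : List Int) :
    solution_alt a = ((List.range a.length).map (fun i =>
      if decide (a.getD i 0 < pvSm a (i + 1)) || decide (a.getD i 0 < pvPm a i) then (1 : Int) else 0)).sum := by
  unfold solution_alt
  rw [PySem.List.enumerate_eq_map_pyRange a 0]
  rw [show PySem.List.len a = ((a.length : Nat) : Int) from rfl]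
  rw [PySem.List.pyRange_zero_nat, List.map_map, List.map_map]
  congr 1
  apply List.map_congr_left
  intro j hj
  rw [List.mem_range] at hj
  simp only [Function.comp_apply]
  rw [PySem.List.pyGetD_natCast]
  have hsl1 : PySem.List.slice a none (some (j : Int)) = a.take j := PySem.List.slice_to_natCast a j
  have hsl2 : PySem.List.slice a (some ((j : Int) + 1)) none = a.drop (j + 1) := by
    rw [show ((j : Int) + 1) = ((j + 1 : Nat) : Int) by push_cast; ring]
    exact PySem.List.slice_from_natCast a (j + 1)
  rw [hsl1, hsl2]
  unfold PySem.List.minD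
  rw [PySem.List.min?_id_cons, PySem.List.min?_id_cons]
  simp only [Option.getD_some]
  simp [pvPm, pvSm, or_comm]

-- ===== VERDICT (by name: the statement is the Claim_ definition above) =====
theorem solution_spec : Claim_equal_solution := by
  intro a _
  unfold Spec_solution
  rw [pvSolutionEq, pvSolutionAltEq]
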